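-- pv_equiv track=rewrite | github.com/ArmaghanKhan47/AI | Scrable/player.py | __findLargestWord__
-- ===== SOURCE A (Python) =====
-- def __findLargestWord__(wordlist):
--     words = []
--     recorded_length = 0
--     for x in wordlist:
--         if len(x) >= recorded_length:
--             recorded_length = len(x)
--             words.append(x)
--     return words
-- ===== SOURCE B (Python) =====
-- def __findLargestWord__(wordlist):
--     return [x for i, x in enumerate(wordlist)
--             if all(len(y) <= len(x) for y in wordlist[:i])]
-- ===== Notes on version B (the rewrite author's own statement) =====
-- stated objective: alternative
-- what changed: Drops A's running-max accumulator entirely: B keeps a word iff it is at least as long as every word strictly before it, a stateless quadratic prefix-scan per element instead of a one-pass stateful maximum.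
import Mathlib
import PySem

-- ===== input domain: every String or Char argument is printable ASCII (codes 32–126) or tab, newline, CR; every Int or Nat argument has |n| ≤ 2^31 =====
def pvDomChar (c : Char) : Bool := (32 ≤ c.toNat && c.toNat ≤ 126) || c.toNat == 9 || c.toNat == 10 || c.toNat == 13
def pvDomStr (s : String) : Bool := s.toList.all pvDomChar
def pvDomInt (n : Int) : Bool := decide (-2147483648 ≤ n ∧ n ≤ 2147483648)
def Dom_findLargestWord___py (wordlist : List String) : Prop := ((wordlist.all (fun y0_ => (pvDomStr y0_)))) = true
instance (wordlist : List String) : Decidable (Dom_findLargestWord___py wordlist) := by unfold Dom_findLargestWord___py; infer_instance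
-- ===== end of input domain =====

-- B drops A's running-max accumulator: it keeps a word iff it is at least as long as every word strictly before it (a stateless per-element prefix scan); alternative algorithm, proved equal.


-- ===== PORT A =====
-- A's loop: for x in wordlist, state (words, recorded_length)
def pvGoA : List String → List String → Int → List String
  | [], words, _ => words
  | x :: xs, words, r =>
    if PySem.Str.len x ≥ r then pvGoA xs (words ++ [x]) (PySem.Str.len x)
    else pvGoA xs words r

def findLargestWord___py (wordlist : List String) : List String :=
  pvGoA wordlist [] 0

-- ===== PORT B =====
-- [x for i, x in enumerate(wordlist) if all(len(y) <= len(x) for y in wordlist[:i])]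
def findLargestWord___py_alt (wordlist : List String) : List String :=
  ((PySem.List.enumerate wordlist).filter
    (fun p => (PySem.List.slice wordlist none (some p.1)).all
      (fun y => decide (PySem.Str.len y ≤ PySem.Str.len p.2)))).map (fun p => p.2)

-- ===== PRECONDITION & SPEC =====
def Spec_findLargestWord___py (wordlist : List String) (out : List String) : Prop := out = findLargestWord___py_alt wordlist
instance (wordlist : List String) (out : List String) : Decidable (Spec_findLargestWord___py wordlist out) := by unfold Spec_findLargestWord___py; infer_instance

-- ===== CLAIM (what is proved, stated in full; the proofs are below) =====
def Claim_equal_findLargestWord___py : Prop := ∀ (wordlist : List String), Dom_findLargestWord___py wordlist → Spec_findLargestWord___py wordlist (findLargestWord___py wordlist)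

-- ===== LEMMAS AND PROOFS =====
-- running maximum of the lengths of a prefix (proof-only abbreviation)
def pvM (pfx : List String) : Int :=
  pfx.foldl (fun m y => max m (PySem.Str.len y)) 0

lemma pvM_append (pfx : List String) (x : String) :
    pvM (pfx ++ [x]) = max (pvM pfx) (PySem.Str.len x) := by
  simp [pvM]

lemma pvLen_nonneg (x : String) : 0 ≤ PySem.Str.len x := by
  simp [PySem.Str.len]

-- running max ≤ L  ↔  every prefix length ≤ L (for 0 ≤ L)
lemma pvM_le_iff (pfx : List String) (L : Int) (hL : 0 ≤ L) :
    pvM pfx ≤ L ↔ ∀ y ∈ pfx, PySem.Str.len y ≤ L := by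
  have key : ∀ (l : List String) (a : Int),
      l.foldl (fun m y => max m (PySem.Str.len y)) a ≤ L ↔
        a ≤ L ∧ ∀ y ∈ l, PySem.Str.len y ≤ L := by
    intro l
    induction l with
    | nil => intro a; simp
    | cons z zs ih =>
      intro a
      simp only [List.foldl_cons, ih, max_le_iff, List.mem_cons]
      constructor
      · rintro ⟨⟨h1, h2⟩, h3⟩
        refine ⟨h1, fun y hy => ?_⟩
        rcases hy with rfl | hy
        · exact h2
        · exact h3 y hy
      · rintro ⟨h1, h2⟩
        exact ⟨⟨h1, h2 z (Or.inl rfl)⟩, fun y hy => h2 y (Or.inr hy)⟩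
  simpa [pvM, hL] using key pfx 0

-- main invariant: A's loop over xs, started after prefix pfx (so r = pvM pfx),
-- equals B's filter over the enumeration of xs starting at pfx.length
lemma pvGoA_eq_filter (xs : List String) : ∀ (pfx words : List String),
    pvGoA xs words (pvM pfx) =
      words ++ ((PySem.List.enumerate xs (pfx.length : Int)).filter
        (fun p => ((pfx ++ xs).take p.1.toNat).all
          (fun y => decide (PySem.Str.len y ≤ PySem.Str.len p.2)))).map (fun p => p.2) := by
  induction xs with
  | nil => intro pfx words; simp [pvGoA, PySem.List.enumerate_nil]
  | cons x xs ih =>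
    intro pfx words
    have htake : ((pfx ++ x :: xs).take pfx.length) = pfx := by simp
    have hiff := pvM_le_iff pfx (PySem.Str.len x) (pvLen_nonneg x)
    have hcond : (((pfx ++ x :: xs).take ((pfx.length : Int)).toNat).all
        (fun y => decide (PySem.Str.len y ≤ PySem.Str.len x)))
          = decide (pvM pfx ≤ PySem.Str.len x) := by
      rw [Int.toNat_natCast, htake, Bool.eq_iff_iff]
      simp only [List.all_eq_true, decide_eq_true_eq]
      exact hiff.symm
    have hl : (pfx ++ [x]) ++ xs = pfx ++ x :: xs := by simp
    have hlen : (((pfx ++ [x]).length : Int)) = (pfx.length : Int) + 1 := by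
      simp
    rw [PySem.List.enumerate_cons, List.filter_cons]
    simp only [hcond]
    by_cases h : pvM pfx ≤ PySem.Str.len x
    · have step := ih (pfx ++ [x]) (words ++ [x])
      rw [pvM_append, max_eq_right h, hlen, hl] at step
      rw [if_pos (by simpa using h), List.map_cons]
      simp only [pvGoA, ge_iff_le, if_pos h]
      rw [step]
      simp
    · have step := ih (pfx ++ [x]) words
      rw [pvM_append, max_eq_left (by omega), hlen, hl] at step
      rw [if_neg (by simpa using h)]
      simp only [pvGoA, ge_iff_le, if_neg h]
      exact step

-- B's slice is a take (indices from enumerate starting at 0 are nonnegative)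
lemma pvAlt_eq (wordlist : List String) :
    findLargestWord___py_alt wordlist =
      ((PySem.List.enumerate wordlist (0 : Int)).filter
        (fun p => (wordlist.take p.1.toNat).all
          (fun y => decide (PySem.Str.len y ≤ PySem.Str.len p.2)))).map (fun p => p.2) := by
  unfold findLargestWord___py_alt
  congr 1
  apply List.filter_congr
  intro p hp
  rcases (PySem.List.mem_enumerate_iff _ _ _).1 hp with ⟨k, hk, rfl⟩
  dsimp only
  rw [PySem.List.slice_to wordlist (by omega)]

-- ===== VERDICT (by name: the statement is the Claim_ definition above) =====
theorem findLargestWord___py_spec : Claim_equal_findLargestWord___py := by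
  intro wordlist _
  unfold Spec_findLargestWord___py findLargestWord___py
  rw [pvAlt_eq]
  have h := pvGoA_eq_filter wordlist [] []
  simpa [pvM] using h
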